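-- pv_equiv track=rewrite | github.com/tylerreisinger/vim-methodstub | plugin/python/methodstub.py | format_type_name
-- ===== SOURCE A (Python) =====
-- def format_type_name(old_name):
--     new_name = old_name
--     for i in range(len(old_name)):
--         ch = old_name[i]
--         if ch == '*' or ch == '&':
--             if i > 0 and old_name[i-1] == ' ':
--                 new_name = new_name[:i-1] + new_name[i:]
--                 break
--     return new_name
-- ===== SOURCE B (Python) =====
-- def format_type_name(old_name):
--     hits = [j for j in (old_name.find(' *'), old_name.find(' &')) if j != -1]
--     if not hits:
--         return old_name
--     j = min(hits)
--     return old_name[:j] + old_name[j+1:]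
-- ===== Notes on version B (the rewrite author's own statement) =====
-- stated objective: faster
-- what changed: Replaces the manual per-character index loop with look-back and slice-splice by two library substring searches (str.find for ' *' and ' &'), taking the earlier hit and deleting that space; str.find's C-level scan gives the constant-factor speedup.
import Mathlib
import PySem

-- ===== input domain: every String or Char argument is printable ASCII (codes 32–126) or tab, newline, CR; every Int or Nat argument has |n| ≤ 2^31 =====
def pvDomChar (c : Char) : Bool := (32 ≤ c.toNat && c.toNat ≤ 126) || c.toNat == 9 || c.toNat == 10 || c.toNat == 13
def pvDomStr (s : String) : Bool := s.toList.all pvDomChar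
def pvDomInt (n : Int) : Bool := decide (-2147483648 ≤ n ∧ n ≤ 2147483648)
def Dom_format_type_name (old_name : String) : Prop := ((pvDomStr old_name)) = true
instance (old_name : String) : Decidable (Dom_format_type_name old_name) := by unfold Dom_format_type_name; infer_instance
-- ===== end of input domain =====

-- B replaces A's index loop (look-back + slice splice) by two str.find substring searches
-- (' *' and ' &'), taking the earlier hit and deleting that space; same return value.

-- ===== PORT A =====
-- A's for-loop with break, scanning index i, carrying new_name (equal to the original
-- until the splice).  take/drop are exact for new_name[:i-1], new_name[i:] since 0 ≤ i-1 here.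
def loopA (old new : List Char) (i : Nat) : List Char :=
  if h : i < old.length then
    if old[i] = '*' ∨ old[i] = '&' then
      if hp : 0 < i then
        if old[i-1]'(by omega) = ' ' then
          new.take (i-1) ++ new.drop i
        else loopA old new (i+1)
      else loopA old new (i+1)
    else loopA old new (i+1)
  else new
termination_by old.length - i

def format_type_name (old_name : String) : String :=
  String.ofList (loopA old_name.toList old_name.toList 0)

-- ===== PORT B =====
def format_type_name_alt (old_name : String) : String :=
  let hits := ([PySem.Str.find old_name " *", PySem.Str.find old_name " &"]).filter (· ≠ -1)
  match PySem.List.min? hits (fun x => x) with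
  | none => old_name
  | some j =>
      String.ofList (PySem.List.slice old_name.toList none (some j) ++
                     PySem.List.slice old_name.toList (some (j + 1)) none)

-- ===== PRECONDITION & SPEC =====
def Spec_format_type_name (old_name : String) (out : String) : Prop := out = format_type_name_alt old_name
instance (old_name : String) (out : String) : Decidable (Spec_format_type_name old_name out) := by unfold Spec_format_type_name; infer_instance

-- ===== CLAIM (what is proved, stated in full; the proofs are below) =====
def Claim_equal_format_type_name : Prop := ∀ (old_name : String), Dom_format_type_name old_name → Spec_format_type_name old_name (format_type_name old_name)

-- ===== LEMMAS AND PROOFS =====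

-- "a space-pointer pair starts at position j"
def QMatch (l : List Char) (j : Nat) : Prop :=
  [' ', '*'] <+: l.drop j ∨ [' ', '&'] <+: l.drop j

lemma qmatch_of_branch (l : List Char) (i : Nat) (h : i < l.length) (hp : 0 < i)
    (hc : l[i] = '*' ∨ l[i] = '&') (hs : l[i-1]'(by omega) = ' ') : QMatch l (i-1) := by
  have h1 : i - 1 < l.length := by omega
  have he : i - 1 + 1 = i := by omega
  have hd1 : l.drop (i-1) = l[i-1] :: l.drop i := by
    rw [List.drop_eq_getElem_cons h1, he]
  have hd2 : l.drop i = l[i] :: l.drop (i+1) := List.drop_eq_getElem_cons h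
  rcases hc with hc | hc
  · exact Or.inl (by rw [hd1, hd2, hs, hc]; exact ⟨_, rfl⟩)
  · exact Or.inr (by rw [hd1, hd2, hs, hc]; exact ⟨_, rfl⟩)

lemma loopA_eq_of_no_match (l : List Char) (i : Nat)
    (h : ∀ j, i ≤ j + 1 → ¬ QMatch l j) : loopA l l i = l := by
  have key : ∀ n i, l.length - i ≤ n → (∀ j, i ≤ j + 1 → ¬ QMatch l j) → loopA l l i = l := by
    intro n
    induction n with
    | zero => intro i hle _; rw [loopA, dif_neg (by omega)]
    | succ n ih =>
      intro i hle h
      rw [loopA]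
      by_cases hlt : i < l.length
      · rw [dif_pos hlt]
        have hrec := ih (i+1) (by omega) (fun j hj => h j (by omega))
        by_cases hc : l[i] = '*' ∨ l[i] = '&'
        · rw [if_pos hc]
          by_cases hp : 0 < i
          · rw [dif_pos hp]
            by_cases hs : l[i-1]'(by omega) = ' '
            · exact absurd (qmatch_of_branch l i hlt hp hc hs) (h (i-1) (by omega))
            · rw [if_neg hs]; exact hrec
          · rw [dif_neg hp]; exact hrec
        · rw [if_neg hc]; exact hrec
      · rw [dif_neg hlt]
  exact key l.length i (by omega) h

lemma qmatch_len (l : List Char) (j : Nat) (hQ : QMatch l j) : j + 1 < l.length := by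
  rcases hQ with h | h <;>
  · have := h.length_le
    simp only [List.length_drop, List.length_cons, List.length_nil] at this
    omega

lemma qmatch_elems (l : List Char) (j : Nat) (hQ : QMatch l j) :
    ∃ (h : j + 1 < l.length), l[j]'(by omega) = ' ' ∧ (l[j+1] = '*' ∨ l[j+1] = '&') := by
  have hlen := qmatch_len l j hQ
  have hd : l.drop j = l[j]'(by omega) :: l[j+1] :: l.drop (j+2) := by
    rw [List.drop_eq_getElem_cons (by omega : j < l.length)]
    congr 1
    rw [List.drop_eq_getElem_cons (by omega : j + 1 < l.length)]
  refine ⟨hlen, ?_⟩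
  rcases hQ with h | h <;> rw [hd] at h <;>
    obtain ⟨t, ht⟩ := h <;> simp only [List.cons_append, List.nil_append, List.cons.injEq] at ht
  · exact ⟨ht.1.symm, Or.inl ht.2.1.symm⟩
  · exact ⟨ht.1.symm, Or.inr ht.2.1.symm⟩

lemma loopA_eq_of_least (l : List Char) (j : Nat) (hQ : QMatch l j) (i : Nat)
    (hi : i ≤ j + 1) (hmin : ∀ k, i ≤ k + 1 → k < j → ¬ QMatch l k) :
    loopA l l i = l.take j ++ l.drop (j + 1) := by
  obtain ⟨hlen, hsp, hptr⟩ := qmatch_elems l j hQ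
  have key : ∀ n i, j + 1 - i ≤ n → i ≤ j + 1 → (∀ k, i ≤ k + 1 → k < j → ¬ QMatch l k) →
      loopA l l i = l.take j ++ l.drop (j + 1) := by
    intro n
    induction n with
    | zero =>
      intro i hle hij hmin
      have hij' : i = j + 1 := by omega
      subst hij'
      rw [loopA, dif_pos (by omega : j + 1 < l.length), if_pos hptr, dif_pos (by omega : 0 < j + 1)]
      rw [if_pos (by simpa using hsp)]
      simp
    | succ n ih =>
      intro i hle hij hmin
      by_cases hij' : i = j + 1
      · exact ih i (by omega) hij hmin
      · have hilt : i < l.length := by omega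
        rw [loopA, dif_pos hilt]
        have hrec := ih (i+1) (by omega) (by omega) (fun k hk hkj => hmin k (by omega) hkj)
        by_cases hc : l[i] = '*' ∨ l[i] = '&'
        · rw [if_pos hc]
          by_cases hp : 0 < i
          · rw [dif_pos hp]
            by_cases hs : l[i-1]'(by omega) = ' '
            · exact absurd (qmatch_of_branch l i hilt hp hc hs) (hmin (i-1) (by omega) (by omega))
            · rw [if_neg hs]; exact hrec
          · rw [dif_neg hp]; exact hrec
        · rw [if_neg hc]; exact hrec
  exact key (j + 1) i (by omega) hi hmin

-- Python str.find characterised: nonnegative result, a hit there, no earlier hit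
lemma find_spec (s sub : List Char) (h : PySem.Chars.find s sub ≠ -1) :
    0 ≤ PySem.Chars.find s sub ∧ sub <+: s.drop (PySem.Chars.find s sub).toNat ∧
      ∀ i, i < (PySem.Chars.find s sub).toNat → ¬ sub <+: s.drop i := by
  have h0 := PySem.Chars.findFrom_natCast_spec s sub 0 (Nat.zero_le _)
  rw [show ((0:Nat):Int) = 0 by simp, PySem.Chars.findFrom_zero] at h0
  have h1 := h0 h
  exact ⟨by exact_mod_cast h1.1, h1.2.1, fun i hi => h1.2.2 i (Nat.zero_le _) hi⟩

lemma not_prefix_drop_of_find_neg (s sub : List Char) (h : PySem.Chars.find s sub = -1) :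
    ∀ j, ¬ sub <+: s.drop j := fun j hp =>
  ((PySem.Chars.find_eq_neg_one_iff s sub).mp h) (hp.isInfix.trans (s.drop_suffix j).isInfix)

-- B's value at a least match position j equals A's splice there
lemma b_val (s : String) (j : Int) (hj : 0 ≤ j) :
    String.ofList (PySem.List.slice s.toList none (some j) ++
        PySem.List.slice s.toList (some (j + 1)) none) =
      String.ofList (s.toList.take j.toNat ++ s.toList.drop (j.toNat + 1)) := by
  have h2 : (j + 1).toNat = j.toNat + 1 := by omega
  rw [PySem.List.slice_to s.toList hj, PySem.List.slice_from s.toList (by omega : 0 ≤ j + 1), h2]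

-- ===== VERDICT (by name: the statement is the Claim_ definition above) =====
theorem format_type_name_spec : Claim_equal_format_type_name := by
  intro s _
  unfold Spec_format_type_name format_type_name format_type_name_alt
  simp only [PySem.Str.find_eq,
    show (" *" : String).toList = [' ', '*'] from by decide,
    show (" &" : String).toList = [' ', '&'] from by decide]
  set l := s.toList with hl
  set f1 := PySem.Chars.find l [' ', '*'] with hf1
  set f2 := PySem.Chars.find l [' ', '&'] with hf2
  by_cases h1 : f1 = -1 <;> by_cases h2 : f2 = -1
  · -- no match anywhere
    have hfil : ([f1, f2].filter (· ≠ -1)) = [] := by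
      simp [List.filter, h1, h2]
    rw [hfil, (PySem.List.min?_eq_none_iff ([] : List Int) (fun x => x)).mpr rfl]
    have : loopA l l 0 = l := loopA_eq_of_no_match l 0 (by
      intro j _ hQ
      rcases hQ with hp | hp
      · exact not_prefix_drop_of_find_neg l _ h1 j hp
      · exact not_prefix_drop_of_find_neg l _ h2 j hp)
    rw [this, hl, String.ofList_toList]
  · -- only ' &' occurs
    obtain ⟨hpos, hhit, hmin⟩ := find_spec l [' ', '&'] h2
    have hfil : ([f1, f2].filter (· ≠ -1)) = [f2] := by
      simp [List.filter, h1, h2]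
    rw [hfil, PySem.List.min?_id_cons, List.foldl_nil]
    rw [loopA_eq_of_least l f2.toNat (Or.inr hhit) 0 (by omega) (by
      intro k _ hk hQ
      rcases hQ with hp | hp
      · exact not_prefix_drop_of_find_neg l _ h1 k hp
      · exact hmin k hk hp)]
    exact (b_val s f2 hpos).symm
  · -- only ' *' occurs
    obtain ⟨hpos, hhit, hmin⟩ := find_spec l [' ', '*'] h1
    have hfil : ([f1, f2].filter (· ≠ -1)) = [f1] := by
      simp [List.filter, h1, h2]
    rw [hfil, PySem.List.min?_id_cons, List.foldl_nil]
    rw [loopA_eq_of_least l f1.toNat (Or.inl hhit) 0 (by omega) (by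
      intro k _ hk hQ
      rcases hQ with hp | hp
      · exact hmin k hk hp
      · exact not_prefix_drop_of_find_neg l _ h2 k hp)]
    exact (b_val s f1 hpos).symm
  · -- both occur: the earlier one wins
    obtain ⟨hpos1, hhit1, hmin1⟩ := find_spec l [' ', '*'] h1
    obtain ⟨hpos2, hhit2, hmin2⟩ := find_spec l [' ', '&'] h2
    have hfil : ([f1, f2].filter (· ≠ -1)) = [f1, f2] := by
      simp [List.filter, h1, h2]
    rw [hfil, PySem.List.min?_id_cons, List.foldl_cons, List.foldl_nil]
    have hQ : QMatch l (min f1 f2).toNat := by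
      rcases le_total f1 f2 with hle | hle
      · rw [min_eq_left hle]; exact Or.inl hhit1
      · rw [min_eq_right hle]; exact Or.inr hhit2
    rw [loopA_eq_of_least l (min f1 f2).toNat hQ 0 (by omega) (by
      intro k _ hk hQ'
      have hk1 : k < f1.toNat := by
        rcases le_total f1 f2 with hle | hle
        · rwa [min_eq_left hle] at hk
        · rw [min_eq_right hle] at hk; omega
      have hk2 : k < f2.toNat := by
        rcases le_total f1 f2 with hle | hle
        · rw [min_eq_left hle] at hk; omega
        · rwa [min_eq_right hle] at hk
      rcases hQ' with hp | hp
      · exact hmin1 k hk1 hp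
      · exact hmin2 k hk2 hp)]
    exact (b_val s (min f1 f2) (le_min hpos1 hpos2)).symm
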